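-- pv_equiv track=rewrite | github.com/CPADelaney/flask_roleplay | nyx/nyx_governance.py | _are_actions_compatible
-- ===== SOURCE A (Python) =====
-- from typing import Dict, List, Any, Optional, Tuple, Union, Callable, Set
--
-- def _are_actions_compatible(action1: Dict[str, Any], action2: Dict[str, Any]) -> bool:
--     """Check if two action directives are compatible."""
--     # Extract action details
--     action1_target = action1.get("target", "")
--     action2_target = action2.get("target", "")
--     action1_description = action1.get("description", "").lower()
--     action2_description = action2.get("description", "").lower()
--
--     # If actions target different entities, they're compatible
--     if action1_target != action2_target:
--         return True
--
--     # Check for opposing actions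
--     opposing_pairs = [
--         (["attack", "harm", "hurt"], ["protect", "defend", "save"]),
--         (["leave", "exit", "depart"], ["stay", "remain", "wait"]),
--         (["hide", "conceal"], ["reveal", "show"]),
--         (["open"], ["close", "shut"]),
--         (["increase", "raise"], ["decrease", "lower"]),
--     ]
--
--     for words1, words2 in opposing_pairs:
--         if any(word in action1_description for word in words1) and any(word in action2_description for word in words2):
--             return False
--         if any(word in action2_description for word in words1) and any(word in action1_description for word in words2):
--             return False
--
--     return True
-- ===== SOURCE B (Python) =====
-- # B: flat inverted word index + per-axis bitmask accumulation; conflict decided by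
-- # bit arithmetic (mask & swapped-mask) instead of re-scanning word lists per pair.
-- WORD_AXIS = [
--     ("attack", 0, 1), ("harm", 0, 1), ("hurt", 0, 1),
--     ("protect", 0, 2), ("defend", 0, 2), ("save", 0, 2),
--     ("leave", 1, 1), ("exit", 1, 1), ("depart", 1, 1),
--     ("stay", 1, 2), ("remain", 1, 2), ("wait", 1, 2),
--     ("hide", 2, 1), ("conceal", 2, 1),
--     ("reveal", 2, 2), ("show", 2, 2),
--     ("open", 3, 1),
--     ("close", 3, 2), ("shut", 3, 2),
--     ("increase", 4, 1), ("raise", 4, 1),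
--     ("decrease", 4, 2), ("lower", 4, 2),
-- ]
--
--
-- def _masks(desc):
--     """Per-axis bitmask: bit 1 = some 'left' word occurs, bit 2 = some 'right' word occurs."""
--     m = [0] * 5
--     for w, ax, bit in WORD_AXIS:
--         m[ax] |= bit if w in desc else 0
--     return m
--
--
-- def _swap(b):
--     """Exchange bit 1 and bit 2 of a 2-bit mask."""
--     return ((b & 1) << 1) | (b >> 1)
--
--
-- def _are_actions_compatible(action1, action2):
--     """Check if two action directives are compatible."""
--     if action1.get("target", "") != action2.get("target", ""):
--         return True
--     m1 = _masks(action1.get("description", "").lower())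
--     m2 = _masks(action2.get("description", "").lower())
--     return all(a & _swap(b) == 0 for a, b in zip(m1, m2))
-- ===== Notes on version B (the rewrite author's own statement) =====
-- stated objective: alternative
-- what changed: B replaces A's pair-by-pair any() re-scans with a flat inverted word->(axis,bit) table that accumulates one 2-bit mask per axis for each description, and decides compatibility arithmetically via mask & bit-swapped mask == 0 over the zipped mask lists.
import Mathlib
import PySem

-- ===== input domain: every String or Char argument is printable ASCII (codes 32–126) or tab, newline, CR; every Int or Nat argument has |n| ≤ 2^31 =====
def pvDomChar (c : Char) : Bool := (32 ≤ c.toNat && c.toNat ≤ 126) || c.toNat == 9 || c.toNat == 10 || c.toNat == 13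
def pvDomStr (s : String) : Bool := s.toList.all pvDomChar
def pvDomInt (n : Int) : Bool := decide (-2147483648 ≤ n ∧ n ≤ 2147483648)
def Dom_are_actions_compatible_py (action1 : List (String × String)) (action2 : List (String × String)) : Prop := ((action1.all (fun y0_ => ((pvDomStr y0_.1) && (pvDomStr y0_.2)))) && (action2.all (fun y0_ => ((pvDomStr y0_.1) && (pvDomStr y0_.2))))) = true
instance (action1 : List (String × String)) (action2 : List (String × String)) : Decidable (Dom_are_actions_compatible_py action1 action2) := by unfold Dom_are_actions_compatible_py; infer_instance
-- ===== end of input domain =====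

-- B replaces A's pair-by-pair any() scans with a flat inverted word->(axis,bit) table accumulating
-- one 2-bit mask per axis per description, deciding compatibility by mask & swapped-mask arithmetic.
-- ===== PORT A =====
def pvOppPairs : List (List String × List String) :=
  [ (["attack", "harm", "hurt"], ["protect", "defend", "save"]),
    (["leave", "exit", "depart"], ["stay", "remain", "wait"]),
    (["hide", "conceal"], ["reveal", "show"]),
    (["open"], ["close", "shut"]),
    (["increase", "raise"], ["decrease", "lower"]) ]

-- any(word in d for word in ws)
def pvAnyIn (ws : List String) (d : String) : Bool := ws.any (fun w => PySem.Str.isIn w d)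

-- the 'for words1, words2 in opposing_pairs' loop with its two early returns
def pvLoopA (pairs : List (List String × List String)) (d1 d2 : String) : Bool :=
  match pairs with
  | [] => true
  | (ws1, ws2) :: rest =>
    if pvAnyIn ws1 d1 && pvAnyIn ws2 d2 then false
    else if pvAnyIn ws1 d2 && pvAnyIn ws2 d1 then false
    else pvLoopA rest d1 d2

def are_actions_compatible_py (action1 : List (String × String)) (action2 : List (String × String)) : Bool :=
  let t1 := (PySem.Dict.mk action1).getD "target" ""
  let t2 := (PySem.Dict.mk action2).getD "target" ""
  let d1 := PySem.Str.lower ((PySem.Dict.mk action1).getD "description" "")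
  let d2 := PySem.Str.lower ((PySem.Dict.mk action2).getD "description" "")
  if t1 ≠ t2 then true
  else pvLoopA pvOppPairs d1 d2

-- ===== PORT B =====
-- WORD_AXIS: flat inverted index word -> (axis, bit)
def pvWordAxis : List (String × Nat × Int) :=
  [ ("attack", 0, 1), ("harm", 0, 1), ("hurt", 0, 1),
    ("protect", 0, 2), ("defend", 0, 2), ("save", 0, 2),
    ("leave", 1, 1), ("exit", 1, 1), ("depart", 1, 1),
    ("stay", 1, 2), ("remain", 1, 2), ("wait", 1, 2),
    ("hide", 2, 1), ("conceal", 2, 1),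
    ("reveal", 2, 2), ("show", 2, 2),
    ("open", 3, 1),
    ("close", 3, 2), ("shut", 3, 2),
    ("increase", 4, 1), ("raise", 4, 1),
    ("decrease", 4, 2), ("lower", 4, 2) ]

-- _masks: m = [0]*5; for w, ax, bit in WORD_AXIS: m[ax] |= bit if w in desc else 0
-- (ax is always a literal 0..4 so Python's m[ax] read/write is exact as getD/set on the 5-list)
def pvMasksB (d : String) : List Int :=
  pvWordAxis.foldl
    (fun m p => m.set p.2.1 (PySem.Int.bor (m.getD p.2.1 0) (if PySem.Str.isIn p.1 d then p.2.2 else 0)))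
    [0, 0, 0, 0, 0]

-- _swap(b) = ((b & 1) << 1) | (b >> 1)
def pvSwapB (b : Int) : Int := PySem.Int.bor ((PySem.Int.band b 1) <<< (1:Nat)) (b >>> (1:Nat))

def are_actions_compatible_py_alt (action1 : List (String × String)) (action2 : List (String × String)) : Bool :=
  if (PySem.Dict.mk action1).getD "target" "" ≠ (PySem.Dict.mk action2).getD "target" "" then true
  else
    let m1 := pvMasksB (PySem.Str.lower ((PySem.Dict.mk action1).getD "description" ""))
    let m2 := pvMasksB (PySem.Str.lower ((PySem.Dict.mk action2).getD "description" ""))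
    (m1.zip m2).all (fun p => (PySem.Int.band p.1 (pvSwapB p.2)) == 0)

-- ===== PRECONDITION & SPEC =====
def Spec_are_actions_compatible_py (action1 : List (String × String)) (action2 : List (String × String)) (out : Bool) : Prop := out = are_actions_compatible_py_alt action1 action2
instance (action1 : List (String × String)) (action2 : List (String × String)) (out : Bool) : Decidable (Spec_are_actions_compatible_py action1 action2 out) := by unfold Spec_are_actions_compatible_py; infer_instance

-- ===== CLAIM (what is proved, stated in full; the proofs are below) =====
def Claim_equal_are_actions_compatible_py : Prop := ∀ (action1 : List (String × String)) (action2 : List (String × String)), Dom_are_actions_compatible_py action1 action2 → Spec_are_actions_compatible_py action1 action2 (are_actions_compatible_py action1 action2)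

-- ===== LEMMAS AND PROOFS =====

-- the accumulated mask for a (3 left, 3 right)-word axis, in canonical (L, R) form
theorem pv_mask33 (a b c x y z : Bool) :
    PySem.Int.bor (PySem.Int.bor (PySem.Int.bor (PySem.Int.bor (PySem.Int.bor (PySem.Int.bor 0
      (if a then (1:Int) else 0)) (if b then 1 else 0)) (if c then 1 else 0))
      (if x then 2 else 0)) (if y then 2 else 0)) (if z then 2 else 0)
    = PySem.Int.bor (if (a || (b || c)) then (1:Int) else 0) (if (x || (y || z)) then 2 else 0) := by
  cases a <;> cases b <;> cases c <;> cases x <;> cases y <;> cases z <;> decide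

-- the accumulated mask for a (2 left, 2 right)-word axis
theorem pv_mask22 (a b x y : Bool) :
    PySem.Int.bor (PySem.Int.bor (PySem.Int.bor (PySem.Int.bor 0
      (if a then (1:Int) else 0)) (if b then 1 else 0)) (if x then 2 else 0)) (if y then 2 else 0)
    = PySem.Int.bor (if (a || b) then (1:Int) else 0) (if (x || y) then 2 else 0) := by
  cases a <;> cases b <;> cases x <;> cases y <;> decide

-- the accumulated mask for the (1 left, 2 right)-word axis
theorem pv_mask12 (a x y : Bool) :
    PySem.Int.bor (PySem.Int.bor (PySem.Int.bor 0
      (if a then (1:Int) else 0)) (if x then 2 else 0)) (if y then 2 else 0)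
    = PySem.Int.bor (if a then (1:Int) else 0) (if (x || y) then 2 else 0) := by
  cases a <;> cases x <;> cases y <;> decide

-- pvMasksB in closed per-axis (L, R) form
theorem pv_masks_eq (d : String) :
    pvMasksB d =
      [ PySem.Int.bor (if pvAnyIn ["attack", "harm", "hurt"] d then (1:Int) else 0) (if pvAnyIn ["protect", "defend", "save"] d then 2 else 0),
        PySem.Int.bor (if pvAnyIn ["leave", "exit", "depart"] d then (1:Int) else 0) (if pvAnyIn ["stay", "remain", "wait"] d then 2 else 0),
        PySem.Int.bor (if pvAnyIn ["hide", "conceal"] d then (1:Int) else 0) (if pvAnyIn ["reveal", "show"] d then 2 else 0),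
        PySem.Int.bor (if pvAnyIn ["open"] d then (1:Int) else 0) (if pvAnyIn ["close", "shut"] d then 2 else 0),
        PySem.Int.bor (if pvAnyIn ["increase", "raise"] d then (1:Int) else 0) (if pvAnyIn ["decrease", "lower"] d then 2 else 0) ] := by
  unfold pvMasksB pvWordAxis pvAnyIn
  simp only [List.foldl_cons, List.foldl_nil, List.set, List.getD, List.getElem?_cons_zero,
    List.getElem?_cons_succ, Option.getD_some, List.any_cons, List.any_nil, Bool.or_false]
  rw [pv_mask33, pv_mask33, pv_mask22, pv_mask12, pv_mask22]

-- the per-axis bit-arithmetic conflict test equals A's boolean test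
theorem pv_conf (L1 R1 L2 R2 : Bool) :
    ((PySem.Int.band (PySem.Int.bor (if L1 then (1:Int) else 0) (if R1 then 2 else 0))
      (pvSwapB (PySem.Int.bor (if L2 then (1:Int) else 0) (if R2 then 2 else 0)))) == 0) =
    (!(L1 && R2) && !(L2 && R1)) := by
  cases L1 <;> cases R1 <;> cases L2 <;> cases R2 <;> decide

-- 'if c then false else r' as a conjunction
theorem pv_iteFalse (c r : Bool) : (if c = true then false else r) = (!c && r) := by
  cases c <;> simp

-- A's early-exit pair loop equals B's zipped bitmask test, for any two descriptions
theorem pv_core_eq (d1 d2 : String) :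
    pvLoopA pvOppPairs d1 d2 =
      ((pvMasksB d1).zip (pvMasksB d2)).all (fun p => (PySem.Int.band p.1 (pvSwapB p.2)) == 0) := by
  simp only [pv_masks_eq, List.zip, List.zipWith, List.all_cons, List.all_nil, pv_conf]
  simp only [pvLoopA, pvOppPairs, pv_iteFalse, Bool.and_assoc, Bool.and_true]

-- ===== VERDICT (by name: the statement is the Claim_ definition above) =====
theorem are_actions_compatible_py_spec : Claim_equal_are_actions_compatible_py := by
  intro a1 a2 _
  unfold Spec_are_actions_compatible_py are_actions_compatible_py are_actions_compatible_py_alt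
  by_cases h : (PySem.Dict.mk a1).getD "target" "" = (PySem.Dict.mk a2).getD "target" ""
  · simp only [h, ne_eq, not_true_eq_false, if_false]
    exact pv_core_eq _ _
  · simp [h]
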